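-- pv_equiv track=rewrite | github.com/Seobway23/Laptop | 백준/Silver/11279. 최대 힙/최대 힙.py | max_heap
-- ===== SOURCE A (Python) =====
-- import heapq
--
-- def max_heap(operations):
--     heap = []
--     result = []
--
--     for op in operations:
--         if op > 0:
--             # 최대 힙 유지를 위한 음수 변환 추가
--             heapq.heappush(heap, -op)
--
--         else:
--             # 비어있지 않으면 최대 값 결과 추가
--             if heap:
--                 max_val = -heapq.heappop(heap)
--                 result.append(max_val)
--
--             else:
--                 result.append(0)
--
--     return result
-- ===== SOURCE B (Python) =====
-- def max_heap(operations):
--     # sorted list maintained by hand-rolled bisect_right + insert; pop max from the end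
--     data = []
--     result = []
--     for op in operations:
--         if op > 0:
--             lo, hi = 0, len(data)
--             while lo < hi:
--                 mid = (lo + hi) // 2
--                 if data[mid] <= op:
--                     lo = mid + 1
--                 else:
--                     hi = mid
--             data.insert(lo, op)
--         else:
--             result.append(data.pop() if data else 0)
--     return result
-- ===== Notes on version B (the rewrite author's own statement) =====
-- stated objective: alternative
-- what changed: Replaces heapq's negated binary min-heap (sift-up/sift-down array operations) with a sorted list maintained by a hand-written bisect_right binary search plus list.insert, popping the maximum from the end.
import Mathlib
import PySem

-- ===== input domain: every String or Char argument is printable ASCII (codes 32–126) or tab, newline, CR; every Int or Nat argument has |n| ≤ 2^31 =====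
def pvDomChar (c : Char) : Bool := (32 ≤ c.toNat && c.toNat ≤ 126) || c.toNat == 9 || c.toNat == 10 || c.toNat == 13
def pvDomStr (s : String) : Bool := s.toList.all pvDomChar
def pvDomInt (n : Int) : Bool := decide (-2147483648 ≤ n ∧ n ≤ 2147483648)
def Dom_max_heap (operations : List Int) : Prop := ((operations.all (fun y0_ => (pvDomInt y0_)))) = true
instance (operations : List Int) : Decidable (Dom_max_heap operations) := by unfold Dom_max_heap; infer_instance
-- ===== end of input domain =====

-- B replaces heapq's negated min-heap by a sorted list (hand-written bisect_right + insert), popping the max from the end.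

-- array-style read: h[i] (all uses are in bounds)
def hget (h : List Int) (i : Nat) : Int := h.getD i 0

-- ===== PORT A =====
-- heapq._siftdown(heap, startpos, pos): newitem = heap[pos] is passed explicitly;
-- Python's final `heap[pos] = newitem` is the base-case `h.set pos newitem`.
def siftdownA (h : List Int) (startpos pos : Nat) (newitem : Int) : List Int :=
  if _h1 : startpos < pos then
    -- parent = (pos - 1) >> 1
    if newitem < hget h ((pos - 1) / 2) then
      siftdownA (h.set pos (hget h ((pos - 1) / 2))) startpos ((pos - 1) / 2) newitem
    else h.set pos newitem
  else h.set pos newitem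
termination_by pos
decreasing_by omega

-- heapq._siftup(heap, pos): newitem = heap[pos] is passed explicitly; the trailing
-- `heap[pos] = newitem; _siftdown(heap, startpos, pos)` is the else branch (siftdownA
-- performs exactly that write).
-- the `rightpos < endpos and not heap[childpos] < heap[rightpos]` child selection
def childSel (h : List Int) (pos : Nat) : Nat :=
  if 2 * pos + 2 < h.length ∧ ¬ hget h (2 * pos + 1) < hget h (2 * pos + 2)
  then 2 * pos + 2 else 2 * pos + 1

lemma childSel_range (h : List Int) (pos : Nat) :
    2 * pos + 1 ≤ childSel h pos ∧ childSel h pos ≤ 2 * pos + 2 ∧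
    (2 * pos + 1 < h.length → childSel h pos < h.length) := by
  unfold childSel; split <;> omega

def siftupA (h : List Int) (startpos pos : Nat) (newitem : Int) : List Int :=
  if _h1 : 2 * pos + 1 < h.length then
    siftupA (h.set pos (hget h (childSel h pos))) startpos (childSel h pos) newitem
  else siftdownA h startpos pos newitem
termination_by h.length - pos
decreasing_by
  have := childSel_range h pos
  simp only [List.length_set]
  omega

-- heapq.heappush(heap, item)
def heappushA (h : List Int) (item : Int) : List Int :=
  siftdownA (h ++ [item]) 0 h.length item

-- heapq.heappop(heap): returns (popped value, new heap); only called on a nonempty heap.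
-- `heap[0] = lastelt; _siftup(heap, 0)` is modeled by passing lastelt as newitem
-- (position 0 is never read by _siftup before being overwritten).
def heappopA (h : List Int) : Int × List Int :=
  -- lastelt = heap.pop(); then `if heap:`
  if h.dropLast ≠ [] then
    (hget h.dropLast 0, siftupA h.dropLast 0 0 (hget h (h.length - 1)))
  else (hget h (h.length - 1), h.dropLast)

-- loop body of A
def stepA (st : List Int × List Int) (op : Int) : List Int × List Int :=
  if op > 0 then (heappushA st.1 (-op), st.2)
  else if st.1 ≠ [] then
    ((heappopA st.1).2, st.2 ++ [-(heappopA st.1).1])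
  else (st.1, st.2 ++ [0])

def max_heap (operations : List Int) : List Int :=
  (operations.foldl stepA ([], [])).2

-- ===== PORT B =====
-- the hand-written bisect_right `while lo < hi` loop
def bisectB (d : List Int) (x : Int) (lo hi : Nat) : Nat :=
  if _h1 : lo < hi then
    -- mid = (lo + hi) // 2
    if hget d ((lo + hi) / 2) ≤ x then bisectB d x ((lo + hi) / 2 + 1) hi
    else bisectB d x lo ((lo + hi) / 2)
  else lo
termination_by hi - lo
decreasing_by all_goals omega

-- loop body of B
def stepB (st : List Int × List Int) (op : Int) : List Int × List Int :=
  if op > 0 then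
    (PySem.List.insert st.1 ((bisectB st.1 op 0 st.1.length : Nat) : Int) op, st.2)
  else if st.1 ≠ [] then
    (st.1.dropLast, st.2 ++ [hget st.1 (st.1.length - 1)])
  else (st.1, st.2 ++ [0])

def max_heap_alt (operations : List Int) : List Int :=
  (operations.foldl stepB ([], [])).2

-- ===== PRECONDITION & SPEC =====
def Spec_max_heap (operations : List Int) (out : List Int) : Prop := out = max_heap_alt operations
instance (operations : List Int) (out : List Int) : Decidable (Spec_max_heap operations out) := by unfold Spec_max_heap; infer_instance

-- ===== CLAIM (what is proved, stated in full; the proofs are below) =====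
def Claim_equal_max_heap : Prop := ∀ (operations : List Int), Dom_max_heap operations → Spec_max_heap operations (max_heap operations)

-- ===== LEMMAS AND PROOFS =====

-- binary min-heap property of A's array
def IsHeap (h : List Int) : Prop :=
  ∀ j, 0 < j → j < h.length → hget h ((j - 1) / 2) ≤ hget h j

-- sortedness of B's list, in index form
def SortedLe (d : List Int) : Prop :=
  ∀ i j, i ≤ j → j < d.length → hget d i ≤ hget d j

lemma hget_set_self (h : List Int) (i : Nat) (v : Int) (hi : i < h.length) :
    hget (h.set i v) i = v := by
  simp [hget, List.getD, hi]

lemma hget_set_ne (h : List Int) (i j : Nat) (v : Int) (hij : i ≠ j) :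
    hget (h.set i v) j = hget h j := by
  simp [hget, List.getD, List.getElem?_set_ne hij]

lemma hget_append_left (h l : List Int) (i : Nat) (hi : i < h.length) :
    hget (h ++ l) i = hget h i := by
  simp [hget, List.getD, List.getElem?_append_left hi]

lemma hget_eq_getElem (h : List Int) (i : Nat) (hi : i < h.length) :
    hget h i = h[i] := by
  simp [hget, List.getD, List.getElem?_eq_getElem hi]

lemma hget_mem (h : List Int) (i : Nat) (hi : i < h.length) : hget h i ∈ h := by
  rw [hget_eq_getElem h i hi]; exact List.getElem_mem hi

lemma hget_dropLast (h : List Int) (i : Nat) (hi : i < h.length - 1) :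
    hget h.dropLast i = hget h i := by
  rw [hget_eq_getElem _ i (by simpa using hi), hget_eq_getElem h i (by omega)]
  exact List.getElem_dropLast (by simpa using hi)

-- P1: replacing h[i] by v is a cons-level permutation
lemma set_perm (h : List Int) (i : Nat) (v : Int) (hi : i < h.length) :
    (hget h i :: h.set i v).Perm (v :: h) := by
  have hsplit : h.take i ++ h[i] :: h.drop (i + 1) = h := by
    rw [List.getElem_cons_drop]; exact List.take_append_drop i h
  rw [hget_eq_getElem h i hi, List.set_eq_take_cons_drop v hi]
  refine ((List.perm_middle.cons _).trans ((List.Perm.swap _ _ _).trans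
    ((List.perm_middle.symm.cons _).trans ?_)))
  rw [hsplit]

lemma set_set_perm (h : List Int) {i j : Nat} (hij : i ≠ j) (hi : i < h.length)
    (hj : j < h.length) (x : Int) :
    ((h.set i (hget h j)).set j x).Perm (h.set i x) := by
  set p := hget h j with hp
  set g := hget h i with hg
  have A1 := set_perm h i p hi
  have A2 := set_perm h i x hi
  have A3 := set_perm (h.set i p) j x (by simpa using hj)
  rw [hget_set_ne h i j p hij] at A3
  have C : (g :: p :: (h.set i p).set j x).Perm (g :: p :: h.set i x) :=
    ((A3.cons g).trans ((List.Perm.swap _ _ _).trans ((A1.cons x).trans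
      ((List.Perm.swap _ _ _).trans (((A2.symm).cons p).trans (List.Perm.swap _ _ _))))))
  exact (C.cons_inv).cons_inv

def SiftInv (h : List Int) (pos : Nat) (x : Int) : Prop :=
  (∀ j, 0 < j → j < h.length → j ≠ pos → hget h ((j - 1) / 2) ≤ hget h j) ∧
  (∀ j, 0 < j → j < h.length → (j - 1) / 2 = pos →
    x ≤ hget h j ∧ (0 < pos → hget h ((pos - 1) / 2) ≤ hget h j))

lemma place_heap (h : List Int) (pos : Nat) (x : Int) (hp : pos < h.length)
    (inv : SiftInv h pos x) (hstop : 0 < pos → hget h ((pos - 1) / 2) ≤ x) :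
    IsHeap (h.set pos x) := by
  intro j hj hjl
  rw [List.length_set] at hjl
  by_cases hjp : j = pos
  · subst hjp
    rw [hget_set_self h j x hjl, hget_set_ne h j ((j - 1) / 2) x (by omega)]
    exact hstop hj
  · by_cases hpj : (j - 1) / 2 = pos
    · rw [hget_set_ne h pos j x (by omega), hpj, hget_set_self h pos x hp]
      exact (inv.2 j hj hjl hpj).1
    · rw [hget_set_ne h pos j x (by omega), hget_set_ne h pos ((j - 1) / 2) x (by omega)]
      exact inv.1 j hj hjl hjp

lemma sift_step_inv (h : List Int) (pos : Nat) (x : Int) (hp : pos < h.length)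
    (h1 : 0 < pos) (h2 : x < hget h ((pos - 1) / 2)) (inv : SiftInv h pos x) :
    SiftInv (h.set pos (hget h ((pos - 1) / 2))) ((pos - 1) / 2) x := by
  constructor
  · intro j hj hjl hjpar
    rw [List.length_set] at hjl
    by_cases hjp : j = pos
    · subst hjp
      rw [hget_set_self h j _ hp, hget_set_ne h j ((j - 1) / 2) _ (by omega)]
    · rw [hget_set_ne h pos j _ (by omega)]
      by_cases hpj : (j - 1) / 2 = pos
      · rw [hpj, hget_set_self h pos _ hp]
        exact (inv.2 j hj hjl hpj).2 h1
      · rw [hget_set_ne h pos ((j - 1) / 2) _ (by omega)]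
        exact inv.1 j hj hjl hjp
  · intro j hj hjl hpj
    rw [List.length_set] at hjl
    by_cases hjp : j = pos
    · subst hjp
      rw [hget_set_self h j _ hp]
      refine ⟨le_of_lt h2, fun hpar => ?_⟩
      rw [hget_set_ne h j (((j - 1) / 2 - 1) / 2) _ (by omega)]
      exact inv.1 ((j - 1) / 2) hpar (by omega) (by omega)
    · rw [hget_set_ne h pos j _ (by omega)]
      have hbase : hget h ((j - 1) / 2) ≤ hget h j := inv.1 j hj hjl hjp
      rw [hpj] at hbase
      refine ⟨le_trans (le_of_lt h2) hbase, fun hpar => ?_⟩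
      rw [hget_set_ne h pos (((pos - 1) / 2 - 1) / 2) _ (by omega)]
      exact le_trans (inv.1 ((pos - 1) / 2) hpar (by omega) (by omega)) hbase

lemma siftdown_heap (pos : Nat) (h : List Int) (x : Int) (hp : pos < h.length)
    (inv : SiftInv h pos x) : IsHeap (siftdownA h 0 pos x) := by
  induction pos using Nat.strong_induction_on generalizing h with
  | _ pos ih =>
    rw [siftdownA]
    split
    · next hpos =>
      split
      · next hlt =>
        exact ih ((pos - 1) / 2) (by omega) _ (by rw [List.length_set]; omega)
          (sift_step_inv h pos x hp hpos hlt inv)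
      · next hge =>
        exact place_heap h pos x hp inv (fun _ => not_lt.mp hge)
    · next hpos =>
      exact place_heap h pos x hp inv (fun hc => absurd hc hpos)

lemma siftdown_perm (pos : Nat) (h : List Int) (x : Int) (hp : pos < h.length) :
    (siftdownA h 0 pos x).Perm (h.set pos x) := by
  induction pos using Nat.strong_induction_on generalizing h with
  | _ pos ih =>
    rw [siftdownA]
    split
    · next hpos =>
      split
      · next hlt =>
        exact (ih ((pos - 1) / 2) (by omega) _ (by rw [List.length_set]; omega)).trans
          (set_set_perm h (by omega) hp (by omega) x)
      · exact List.Perm.refl _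
    · exact List.Perm.refl _

def DownInv (h : List Int) (pos : Nat) : Prop :=
  (∀ j, 0 < j → j < h.length → j ≠ pos → (j - 1) / 2 ≠ pos →
    hget h ((j - 1) / 2) ≤ hget h j) ∧
  (∀ j, 0 < j → j < h.length → (j - 1) / 2 = pos → 0 < pos →
    hget h ((pos - 1) / 2) ≤ hget h j)

lemma childSel_min (h : List Int) (pos : Nat) (hc : 2 * pos + 1 < h.length) :
    ∀ j, 2 * pos + 1 ≤ j → j ≤ 2 * pos + 2 → j < h.length →
    hget h (childSel h pos) ≤ hget h j := by
  intro j hj1 hj2 hjl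
  unfold childSel
  split
  · next hcond =>
    rcases Nat.eq_or_lt_of_le hj1 with hl | hl
    · rw [← hl]; exact le_of_not_gt hcond.2
    · have : j = 2 * pos + 2 := by omega
      rw [this]
  · next hcond =>
    rcases Nat.eq_or_lt_of_le hj1 with hl | hl
    · rw [← hl]
    · have hj : j = 2 * pos + 2 := by omega
      rw [Decidable.not_and_iff_not_or_not] at hcond
      rcases hcond with hcc | hcc
      · omega
      · rw [hj]; exact le_of_lt (not_not.mp hcc)

lemma leaf_inv (h : List Int) (pos : Nat) (x : Int) (hleaf : ¬ 2 * pos + 1 < h.length)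
    (inv : DownInv h pos) : SiftInv h pos x := by
  constructor
  · intro j hj hjl hjp
    by_cases hpj : (j - 1) / 2 = pos
    · omega
    · exact inv.1 j hj hjl hjp hpj
  · intro j hj hjl hpj
    omega

lemma down_step_inv (h : List Int) (pos : Nat) (hp : pos < h.length)
    (hc : 2 * pos + 1 < h.length) (inv : DownInv h pos) :
    DownInv (h.set pos (hget h (childSel h pos))) (childSel h pos) := by
  obtain ⟨hc1, hc2, hc3⟩ := childSel_range h pos
  have hcl := hc3 hc
  constructor
  · intro j hj hjl hjc hpjc
    rw [List.length_set] at hjl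
    by_cases hjp : j = pos
    · subst hjp
      rw [hget_set_self h j _ hp, hget_set_ne h j ((j - 1) / 2) _ (by omega)]
      exact inv.2 (childSel h j) (by omega) hcl (by omega) hj
    · rw [hget_set_ne h pos j _ (by omega)]
      by_cases hpj : (j - 1) / 2 = pos
      · rw [hpj, hget_set_self h pos _ hp]
        exact childSel_min h pos hc j (by omega) (by omega) hjl
      · rw [hget_set_ne h pos ((j - 1) / 2) _ (by omega)]
        exact inv.1 j hj hjl hjp hpj
  · intro j hj hjl hpj _
    rw [List.length_set] at hjl
    have hcp : (childSel h pos - 1) / 2 = pos := by omega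
    rw [hcp, hget_set_self h pos _ hp, hget_set_ne h pos j _ (by omega)]
    have hineq := inv.1 j hj hjl (by omega) (by omega)
    rw [hpj] at hineq
    exact hineq

lemma siftup_heap (n pos : Nat) (h : List Int) (x : Int) (hn : h.length - pos ≤ n)
    (hp : pos < h.length) (inv : DownInv h pos) : IsHeap (siftupA h 0 pos x) := by
  induction n generalizing h pos with
  | zero => omega
  | succ n ih =>
    rw [siftupA]
    split
    · next hc =>
      obtain ⟨hc1, hc2, hc3⟩ := childSel_range h pos
      exact ih (childSel h pos) _ (by rw [List.length_set]; omega)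
        (by rw [List.length_set]; exact hc3 hc) (down_step_inv h pos hp hc inv)
    · next hc =>
      exact siftdown_heap pos h x hp (leaf_inv h pos x hc inv)

lemma siftup_perm (n pos : Nat) (h : List Int) (x : Int) (hn : h.length - pos ≤ n)
    (hp : pos < h.length) : (siftupA h 0 pos x).Perm (h.set pos x) := by
  induction n generalizing h pos with
  | zero => omega
  | succ n ih =>
    rw [siftupA]
    split
    · next hc =>
      obtain ⟨hc1, hc2, hc3⟩ := childSel_range h pos
      exact (ih (childSel h pos) _ (by rw [List.length_set]; omega)
        (by rw [List.length_set]; exact hc3 hc)).trans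
        (set_set_perm h (by omega) hp (hc3 hc) x)
    · exact siftdown_perm pos h x hp

lemma push_heap (h : List Int) (x : Int) (hh : IsHeap h) : IsHeap (heappushA h x) := by
  unfold heappushA
  refine siftdown_heap h.length (h ++ [x]) x (by simp) ⟨?_, ?_⟩
  · intro j hj hjl hjp
    rw [List.length_append, List.length_singleton] at hjl
    rw [hget_append_left h [x] j (by omega), hget_append_left h [x] ((j - 1) / 2) (by omega)]
    exact hh j hj (by omega)
  · intro j hj hjl hpj
    rw [List.length_append, List.length_singleton] at hjl
    omega

lemma set_append_last (h : List Int) (x : Int) : (h ++ [x]).set h.length x = h ++ [x] := by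
  induction h with
  | nil => rfl
  | cons a t ih => simp [ih]

lemma push_perm (h : List Int) (x : Int) : (heappushA h x).Perm (x :: h) := by
  unfold heappushA
  refine (siftdown_perm h.length (h ++ [x]) x (by simp)).trans ?_
  rw [set_append_last]
  exact List.perm_append_singleton x h

lemma root_min (h : List Int) (hh : IsHeap h) :
    ∀ j, j < h.length → hget h 0 ≤ hget h j := by
  intro j
  induction j using Nat.strong_induction_on with
  | _ j ih =>
    intro hj
    rcases Nat.eq_zero_or_pos j with h0 | h0
    · subst h0; exact le_refl _
    · exact le_trans (ih ((j - 1) / 2) (by omega) (by omega)) (hh j h0 hj)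

lemma pop_fst (h : List Int) (hne : h ≠ []) : (heappopA h).1 = hget h 0 := by
  unfold heappopA
  have hlen : 0 < h.length := List.length_pos_iff.mpr hne
  split
  · next ht =>
    have htl : 0 < h.length - 1 := by
      have := List.length_pos_iff.mpr ht
      rw [List.length_dropLast] at this
      omega
    simp only [hget_dropLast h 0 htl]
  · next ht =>
    have hd : h.dropLast = [] := not_not.mp (by simpa using ht)
    have hl1 : h.length = 1 := by
      have := congrArg List.length hd
      rw [List.length_dropLast] at this
      simp at this
      omega
    simp [hl1]

lemma pop_heap (h : List Int) (hh : IsHeap h) (_hne : h ≠ []) : IsHeap (heappopA h).2 := by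
  unfold heappopA
  split
  · next ht =>
    have htl : 0 < h.dropLast.length := List.length_pos_iff.mpr ht
    refine siftup_heap h.dropLast.length 0 h.dropLast _ (le_refl _) htl ⟨?_, ?_⟩
    · intro j hj hjl _ _
      rw [List.length_dropLast] at hjl
      rw [hget_dropLast h j (by omega), hget_dropLast h ((j - 1) / 2) (by omega)]
      exact hh j hj (by omega)
    · intro j hj hjl hpj hpos
      omega
  · next ht =>
    intro j hj hjl
    have : h.dropLast = [] := not_not.mp (by simpa using ht)
    rw [this] at hjl
    simp at hjl

lemma pop_perm (h : List Int) (hne : h ≠ []) :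
    ((heappopA h).1 :: (heappopA h).2).Perm h := by
  have hlast : hget h (h.length - 1) = h.getLast hne := by
    rw [hget_eq_getElem h (h.length - 1) (by
      have := List.length_pos_iff.mpr hne; omega)]
    exact (List.getLast_eq_getElem hne).symm
  unfold heappopA
  split
  · next ht =>
    have htl : 0 < h.dropLast.length := List.length_pos_iff.mpr ht
    refine ((siftup_perm h.dropLast.length 0 h.dropLast _ (le_refl _) htl).cons _).trans ?_
    refine (set_perm h.dropLast 0 _ htl).trans ?_
    refine (List.perm_append_singleton _ _).symm.trans ?_
    rw [hlast, List.dropLast_append_getLast hne]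
  · next ht =>
    have hd : h.dropLast = [] := not_not.mp (by simpa using ht)
    have hl1 : h.length ≤ 1 := by
      have := congrArg List.length hd
      rw [List.length_dropLast] at this
      simp at this
      omega
    obtain ⟨a, rfl⟩ : ∃ a, h = [a] := by
      match h, hne with
      | [a], _ => exact ⟨a, rfl⟩
      | (a :: b :: t), _ => simp at hl1
    simp [hget]

lemma bisect_spec (d : List Int) (x : Int) (hs : SortedLe d) :
    ∀ n lo hi, hi - lo ≤ n → lo ≤ hi → hi ≤ d.length →
    (∀ j, j < lo → hget d j ≤ x) → (∀ j, hi ≤ j → j < d.length → x < hget d j) →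
    bisectB d x lo hi ≤ d.length ∧
    (∀ j, j < bisectB d x lo hi → hget d j ≤ x) ∧
    (∀ j, bisectB d x lo hi ≤ j → j < d.length → x < hget d j) := by
  intro n
  induction n with
  | zero =>
    intro lo hi hn hlh hhl h1 h2
    rw [bisectB, dif_neg (by omega : ¬ lo < hi)]
    exact ⟨by omega, h1, fun j hj hjl => h2 j (by omega) hjl⟩
  | succ n ih =>
    intro lo hi hn hlh hhl h1 h2
    rw [bisectB]
    by_cases hlt : lo < hi
    · rw [dif_pos hlt]
      by_cases hle : hget d ((lo + hi) / 2) ≤ x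
      · rw [if_pos hle]
        refine ih ((lo + hi) / 2 + 1) hi (by omega) (by omega) hhl ?_ h2
        intro j hj
        by_cases hjlo : j < lo
        · exact h1 j hjlo
        · exact le_trans (hs j ((lo + hi) / 2) (by omega) (by omega)) hle
      · rw [if_neg hle]
        refine ih lo ((lo + hi) / 2) (by omega) (by omega) (by omega) h1 ?_
        intro j hj hjl
        exact lt_of_lt_of_le (not_le.mp hle) (hs ((lo + hi) / 2) j hj hjl)
    · rw [dif_neg hlt]
      exact ⟨by omega, h1, fun j hj hjl => h2 j (by omega) hjl⟩

lemma hget_insert (d : List Int) (r : Nat) (x : Int) (hr : r ≤ d.length) (i : Nat) :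
    hget (d.take r ++ x :: d.drop r) i =
      if i < r then hget d i else if i = r then x else hget d (i - 1) := by
  have hlt : (d.take r).length = r := by simp [List.length_take]; omega
  by_cases h1 : i < r
  · rw [if_pos h1, hget_append_left _ _ i (by omega)]
    simp only [hget, List.getD, List.getElem?_take]
    rw [if_pos h1]
  · rw [if_neg h1]
    by_cases h2 : i = r
    · subst h2
      rw [if_pos rfl]
      simp [hget, List.getD, List.getElem?_append_right (le_of_eq hlt), hlt]
    · rw [if_neg h2]
      simp only [hget, List.getD]
      rw [List.getElem?_append_right (by omega)]
      simp only [hlt, List.getElem?_cons]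
      rw [if_neg (by omega), List.getElem?_drop]
      have hidx : r + (i - r - 1) = i - 1 := by omega
      rw [hidx]

lemma insert_sorted (d : List Int) (r : Nat) (x : Int) (hr : r ≤ d.length)
    (hs : SortedLe d) (h1 : ∀ j, j < r → hget d j ≤ x)
    (h2 : ∀ j, r ≤ j → j < d.length → x < hget d j) :
    SortedLe (d.take r ++ x :: d.drop r) := by
  intro i j hij hj
  have hlen : (d.take r ++ x :: d.drop r).length = d.length + 1 := by
    simp
  rw [hlen] at hj
  rw [hget_insert d r x hr i, hget_insert d r x hr j]
  by_cases hir : i < r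
  · rw [if_pos hir]
    by_cases hjr : j < r
    · rw [if_pos hjr]; exact hs i j hij (by omega)
    · rw [if_neg hjr]
      by_cases hje : j = r
      · rw [if_pos hje]; exact h1 i (by omega)
      · rw [if_neg hje]; exact hs i (j - 1) (by omega) (by omega)
  · rw [if_neg hir]
    by_cases hie : i = r
    · rw [if_pos hie]
      rw [if_neg (by omega : ¬ j < r)]
      by_cases hje : j = r
      · rw [if_pos hje]
      · rw [if_neg hje]; exact le_of_lt (h2 (j - 1) (by omega) (by omega))
    · rw [if_neg hie]
      rw [if_neg (by omega : ¬ j < r), if_neg (by omega : ¬ j = r)]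
      exact hs (i - 1) (j - 1) (by omega) (by omega)

lemma insert_perm (d : List Int) (r : Nat) (x : Int) :
    (d.take r ++ x :: d.drop r).Perm (x :: d) := by
  refine List.perm_middle.trans ?_
  rw [List.take_append_drop]

lemma sorted_dropLast (d : List Int) (hs : SortedLe d) : SortedLe d.dropLast := by
  intro i j hij hj
  rw [List.length_dropLast] at hj
  rw [hget_dropLast d i (by omega), hget_dropLast d j (by omega)]
  exact hs i j hij (by omega)

lemma sorted_last_max (d : List Int) (hs : SortedLe d) (a : Int) (ha : a ∈ d) :
    a ≤ hget d (d.length - 1) := by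
  obtain ⟨i, hi, rfl⟩ := List.mem_iff_getElem.mp ha
  rw [← hget_eq_getElem d i hi]
  exact hs i (d.length - 1) (by omega) (by omega)

-- the coupling invariant between A's and B's loop states
def StRel (a b : List Int × List Int) : Prop :=
  IsHeap a.1 ∧ SortedLe b.1 ∧ a.1.Perm (b.1.map (fun v => -v)) ∧ a.2 = b.2

lemma mem_neg_map (l : List Int) (w : Int) (hw : w ∈ l.map (fun v => -v)) :
    ∃ u, u ∈ l ∧ w = -u := by
  obtain ⟨u, hu, hwu⟩ := List.mem_map.mp hw
  exact ⟨u, hu, hwu.symm⟩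

lemma step_rel (a b : List Int × List Int) (op : Int) (hr : StRel a b) :
    StRel (stepA a op) (stepB b op) := by
  obtain ⟨hH, hS, hP, hR⟩ := hr
  have hlen : a.1.length = b.1.length := by
    have := hP.length_eq
    rwa [List.length_map] at this
  unfold stepA stepB
  by_cases hop : op > 0
  · rw [if_pos hop, if_pos hop]
    have hb := bisect_spec b.1 op hS b.1.length 0 b.1.length (by omega) (by omega)
      (le_refl _) (fun j hj => absurd hj (by omega)) (fun j hj hjl => absurd hjl (by omega))
    have hins : PySem.List.insert b.1 ((bisectB b.1 op 0 b.1.length : Nat) : Int) op =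
        b.1.take (bisectB b.1 op 0 b.1.length) ++ op :: b.1.drop (bisectB b.1 op 0 b.1.length) :=
      PySem.List.insert_natCast b.1 (bisectB b.1 op 0 b.1.length) op hb.1
    refine ⟨push_heap a.1 (-op) hH, ?_, ?_, hR⟩
    · rw [hins]
      exact insert_sorted b.1 _ op hb.1 hS hb.2.1 hb.2.2
    · refine (push_perm a.1 (-op)).trans ?_
      have hstep : ((-op) :: a.1).Perm ((op :: b.1).map (fun v => -v)) := by
        simpa using hP.cons (-op)
      refine hstep.trans ?_
      rw [hins]
      exact ((insert_perm b.1 _ op).map _).symm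
  · rw [if_neg hop, if_neg hop]
    by_cases hae : a.1 ≠ []
    · have hbe : b.1 ≠ [] := by
        intro hc
        rw [hc] at hlen
        simp at hlen
        exact hae hlen
      rw [if_pos hae, if_pos hbe]
      have hal : 0 < a.1.length := List.length_pos_iff.mpr hae
      have hbl : 0 < b.1.length := List.length_pos_iff.mpr hbe
      have hm : hget b.1 (b.1.length - 1) ∈ b.1 := hget_mem b.1 _ (by omega)
      have hvm : (heappopA a.1).1 = -(hget b.1 (b.1.length - 1)) := by
        rw [pop_fst a.1 hae]
        have hv := hget_mem a.1 0 hal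
        obtain ⟨u, hu, hwu⟩ := mem_neg_map b.1 _ (hP.mem_iff.mp hv)
        have h1 : hget a.1 0 ≥ -(hget b.1 (b.1.length - 1)) := by
          have := sorted_last_max b.1 hS u hu
          omega
        have h2 : hget a.1 0 ≤ -(hget b.1 (b.1.length - 1)) := by
          have hmm : -(hget b.1 (b.1.length - 1)) ∈ a.1 :=
            hP.mem_iff.mpr (List.mem_map.mpr ⟨_, hm, rfl⟩)
          obtain ⟨i, hi, hie⟩ := List.mem_iff_getElem.mp hmm
          rw [← hget_eq_getElem a.1 i hi] at hie
          rw [← hie]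
          exact root_min a.1 hH i hi
        omega
      have hsplit : b.1.dropLast ++ [hget b.1 (b.1.length - 1)] = b.1 := by
        have := List.dropLast_append_getLast hbe
        rw [hget_eq_getElem b.1 (b.1.length - 1) (by omega), ← List.getLast_eq_getElem hbe]
        exact this
      refine ⟨pop_heap a.1 hH hae, sorted_dropLast b.1 hS, ?_, ?_⟩
      · have hchain : ((heappopA a.1).1 :: (heappopA a.1).2).Perm
            ((-(hget b.1 (b.1.length - 1))) :: b.1.dropLast.map (fun v => -v)) := by
          refine (pop_perm a.1 hae).trans (hP.trans ?_)
          conv_lhs => rw [← hsplit]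
          rw [List.map_append]
          exact List.perm_append_singleton _ _
        rw [hvm] at hchain
        exact hchain.cons_inv
      · rw [hR, hvm]
        simp
    · have hbe : b.1 = [] := by
        rw [not_not] at hae
        rw [hae] at hlen
        simp at hlen
        exact List.length_eq_zero_iff.mp hlen.symm
      rw [if_neg hae, if_neg (by simpa using hbe)]
      exact ⟨hH, hS, hP, by rw [hR]⟩

lemma fold_rel (ops : List Int) (a b : List Int × List Int) (hr : StRel a b) :
    StRel (ops.foldl stepA a) (ops.foldl stepB b) := by
  induction ops generalizing a b with
  | nil => exact hr
  | cons o t ih => exact ih _ _ (step_rel a b o hr)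

-- ===== VERDICT (by name: the statement is the Claim_ definition above) =====
theorem max_heap_spec : Claim_equal_max_heap := by
  intro operations _
  unfold Spec_max_heap max_heap max_heap_alt
  have h := fold_rel operations ([], []) ([], [])
    ⟨by intro j hj hl; simp at hl,
     by intro i j _ hl; simp at hl,
     by simp, rfl⟩
  exact h.2.2.2
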